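-- pv_equiv track=rewrite | github.com/ryan-papa/naver-cafe-monitor | scripts/deploy/compose_with_sops_env.py | parse_dotenv
-- ===== SOURCE A (Python) =====
-- def parse_dotenv(text: str) -> dict[str, str]:
--     env: dict[str, str] = {}
--     current_key: str | None = None
--     current_value: list[str] = []
--
--     for line in text.splitlines():
--         if current_key is not None:
--             current_value.append(line)
--             if line.endswith("-----END PRIVATE KEY-----") or line.endswith("-----END PUBLIC KEY-----"):
--                 env[current_key] = "\n".join(current_value)
--                 current_key = None
--                 current_value = []
--             continue
--
--         stripped = line.strip()
--         if not stripped or stripped.startswith("#") or "=" not in line: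
--             continue
--
--         key, value = line.split("=", 1)
--         if value.startswith("-----BEGIN ") and "-----END " not in value:
--             current_key = key.strip()
--             current_value = [value]
--             continue
--         env[key.strip()] = value
--
--     if current_key is not None:
--         env[current_key] = "\n".join(current_value)
--     return env
-- ===== SOURCE B (Python) =====
-- def parse_dotenv(text: str) -> dict[str, str]:
--     env: dict[str, str] = {}
--     lines = text.splitlines()
--     i = 0
--     n = len(lines)
--     while i < n:
--         line = lines[i]
--         i += 1
--         stripped = line.strip()
--         if not stripped or stripped.startswith("#") or "=" not in line:
--             continue
--         key, value = line.split("=", 1)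
--         if value.startswith("-----BEGIN ") and "-----END " not in value:
--             block = [value]
--             while i < n:
--                 nxt = lines[i]
--                 i += 1
--                 block.append(nxt)
--                 if nxt.endswith("-----END PRIVATE KEY-----") or nxt.endswith("-----END PUBLIC KEY-----"):
--                     break
--             env[key.strip()] = "\n".join(block)
--         else:
--             env[key.strip()] = value
--     return env
-- ===== Notes on version B (the rewrite author's own statement) =====
-- stated objective: alternative
-- what changed: B replaces A's cross-iteration current_key/current_value flag state with an explicit index walk that, on a BEGIN line, runs a nested inner loop consuming the following lines of the block up to its END line.
import Mathlib
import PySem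

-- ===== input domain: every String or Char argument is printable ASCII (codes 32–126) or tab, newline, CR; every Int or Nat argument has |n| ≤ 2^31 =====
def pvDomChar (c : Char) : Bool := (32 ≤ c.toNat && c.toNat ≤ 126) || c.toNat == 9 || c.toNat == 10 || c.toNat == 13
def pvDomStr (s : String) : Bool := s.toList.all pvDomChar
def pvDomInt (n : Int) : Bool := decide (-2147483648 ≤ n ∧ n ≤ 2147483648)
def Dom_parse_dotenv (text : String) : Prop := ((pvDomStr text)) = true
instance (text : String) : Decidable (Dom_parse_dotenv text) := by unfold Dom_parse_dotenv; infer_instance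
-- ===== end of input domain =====

-- B replaces A's cross-iteration current_key/current_value flag state with a nested
-- consume-forward loop over the lines (objective: alternative decomposition, same cost).

-- ===== PORT A =====
-- 'line.endswith("-----END PRIVATE KEY-----") or line.endswith("-----END PUBLIC KEY-----")'
def pvAEnds (line : String) : Bool :=
  PySem.Str.endswith line "-----END PRIVATE KEY-----" || PySem.Str.endswith line "-----END PUBLIC KEY-----"

-- one iteration of A's for-loop over (env, current_key, current_value)
def pvAStep (st : PySem.Dict String String × Option String × List String) (line : String) :
    PySem.Dict String String × Option String × List String :=
  match st with
  | (env, some k, cur) =>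
      let cur := cur ++ [line]
      if pvAEnds line then (env.insert k (PySem.Str.join "\n" cur), none, [])
      else (env, some k, cur)
  | (env, none, cur) =>
      let stripped := PySem.Str.strip line
      if stripped == "" || PySem.Str.startswith stripped "#" || !PySem.Str.isIn "=" line then
        (env, none, cur)
      else
        match PySem.Str.splitMax? line "=" 1 with
        | some [key, value] =>
            if PySem.Str.startswith value "-----BEGIN " && !PySem.Str.isIn "-----END " value then
              (env, some (PySem.Str.strip key), [value])
            else (env.insert (PySem.Str.strip key) value, none, cur)
        | _ => (env, none, cur)   -- unreachable: '=' is in line, so split has exactly 2 parts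

-- the final 'if current_key is not None: env[current_key] = "\n".join(current_value)'
def pvAFlush (st : PySem.Dict String String × Option String × List String) :
    PySem.Dict String String :=
  match st with
  | (env, some k, cur) => env.insert k (PySem.Str.join "\n" cur)
  | (env, none, _) => env

def parse_dotenv (text : String) : List (String × String) :=
  (pvAFlush ((PySem.Str.splitlines text).foldl pvAStep (PySem.Dict.empty, none, []))).items

-- ===== PORT B =====
-- inner while loop: append following lines into the block until an END line (or input runs out),
-- return the joined value and the unconsumed rest
def pvConsume (acc : List String) : List String → String × List String
  | [] => (PySem.Str.join "\n" acc, [])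
  | l :: rest =>
      if pvAEnds l then (PySem.Str.join "\n" (acc ++ [l]), rest)
      else pvConsume (acc ++ [l]) rest

theorem pvConsume_len (acc : List String) (ls : List String) :
    (pvConsume acc ls).2.length ≤ ls.length := by
  induction ls generalizing acc with
  | nil => simp [pvConsume]
  | cons l rest ih =>
      simp only [pvConsume]
      split
      · simp
      · exact le_trans (ih _) (Nat.le_succ _)

-- outer while loop over the lines
def pvGo (env : PySem.Dict String String) : List String → PySem.Dict String String
  | [] => env
  | line :: rest =>
      let stripped := PySem.Str.strip line
      if stripped == "" || PySem.Str.startswith stripped "#" || !PySem.Str.isIn "=" line then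
        pvGo env rest
      else
        match PySem.Str.splitMax? line "=" 1 with
        | some [key, value] =>
            if PySem.Str.startswith value "-----BEGIN " && !PySem.Str.isIn "-----END " value then
              pvGo (env.insert (PySem.Str.strip key) (pvConsume [value] rest).1)
                (pvConsume [value] rest).2
            else pvGo (env.insert (PySem.Str.strip key) value) rest
        | _ => pvGo env rest   -- unreachable: '=' is in line, so split has exactly 2 parts
  termination_by ls => ls.length
  decreasing_by
  · simp
  · exact Nat.lt_succ_of_le (pvConsume_len _ _)
  · simp
  · simp

def parse_dotenv_alt (text : String) : List (String × String) :=
  (pvGo PySem.Dict.empty (PySem.Str.splitlines text)).items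

-- ===== PRECONDITION & SPEC =====
def Spec_parse_dotenv (text : String) (out : List (String × String)) : Prop := out = parse_dotenv_alt text
instance (text : String) (out : List (String × String)) : Decidable (Spec_parse_dotenv text out) := by unfold Spec_parse_dotenv; infer_instance

-- ===== CLAIM (what is proved, stated in full; the proofs are below) =====
def Claim_equal_parse_dotenv : Prop := ∀ (text : String), Dom_parse_dotenv text → Spec_parse_dotenv text (parse_dotenv text)

-- ===== LEMMAS AND PROOFS =====
theorem pv_main (ls : List String) :
    (∀ env cur, pvAFlush (ls.foldl pvAStep (env, none, cur)) = pvGo env ls) ∧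
    (∀ env k cur, pvAFlush (ls.foldl pvAStep (env, some k, cur)) =
        pvGo (env.insert k (pvConsume cur ls).1) (pvConsume cur ls).2) := by
  induction ls with
  | nil => exact ⟨fun env cur => by simp [pvGo, pvAFlush], fun env k cur => by simp [pvGo, pvConsume, pvAFlush]⟩
  | cons l rest ih =>
      constructor
      · intro env cur
        simp only [List.foldl_cons, pvGo, pvAStep]
        split
        · exact ih.1 env cur
        · split
          · split
            · exact ih.2 _ _ _
            · exact ih.1 _ _
          · exact ih.1 _ _
      · intro env k cur
        simp only [List.foldl_cons, pvAStep, pvConsume]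
        split
        · rw [ih.1]
        · rw [ih.2]

-- ===== VERDICT (by name: the statement is the Claim_ definition above) =====
theorem parse_dotenv_spec : Claim_equal_parse_dotenv := by
  intro text _
  unfold Spec_parse_dotenv parse_dotenv parse_dotenv_alt
  rw [(pv_main (PySem.Str.splitlines text)).1]
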